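-- pv_equiv track=rewrite | github.com/eda-ricercatore/bibtex-analytics | convert_bibtex_to_markdown.py | process_author_field
-- ===== SOURCE A (Python) =====
-- def process_author_field(list_of_authors=None):
-- 	# Is the list of author names not a None object?
-- 	if list_of_authors is not None:
-- 		# Yes. Delimit the names of the authors by " and ".
-- 		list_of_authors_delimited = list_of_authors.split(" and ")
-- 		# Final list of names of authors.
-- 		list_of_authors_final = ""
-- 		for index, name in enumerate(list_of_authors_delimited):
-- 			if 0 == index:
-- 				list_of_authors_final = name
-- 			elif ((len(list_of_authors_delimited) - 1) == index):
-- 				list_of_authors_final = list_of_authors_final + ", and " + name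
-- 			else:
-- 				list_of_authors_final = list_of_authors_final + ", " + name
-- 		return list_of_authors_final
-- 	else:
-- 		# No, it is a None object. Return an empty string.
-- 		return ""
-- ===== SOURCE B (Python) =====
-- def process_author_field(list_of_authors=None):
--     if list_of_authors is None:
--         return ""
--
--     def oxford(names):
--         if len(names) <= 1:
--             return names[0] if names else ""
--         if len(names) == 2:
--             return names[0] + ", and " + names[1]
--         return names[0] + ", " + oxford(names[1:])
--
--     return oxford(list_of_authors.split(" and "))
-- ===== Notes on version B (the rewrite author's own statement) =====
-- stated objective: alternative
-- what changed: A's index-tracking enumerate loop with an accumulator and first/middle/last branches is replaced by a structural right-recursion on the name list that emits the head name plus a comma and recurses, with a two-element base case inserting the Oxford conjunction.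
import Mathlib
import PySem

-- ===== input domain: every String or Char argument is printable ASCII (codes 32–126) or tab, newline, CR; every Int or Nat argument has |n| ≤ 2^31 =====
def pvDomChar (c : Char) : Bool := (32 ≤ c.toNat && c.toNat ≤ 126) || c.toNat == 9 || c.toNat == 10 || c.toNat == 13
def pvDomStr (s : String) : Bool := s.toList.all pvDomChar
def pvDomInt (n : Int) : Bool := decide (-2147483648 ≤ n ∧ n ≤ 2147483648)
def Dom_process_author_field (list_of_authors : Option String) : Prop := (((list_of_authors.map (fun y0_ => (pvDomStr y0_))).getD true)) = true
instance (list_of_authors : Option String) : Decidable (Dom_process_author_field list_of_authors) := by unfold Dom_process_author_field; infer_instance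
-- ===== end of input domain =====

-- B replaces A's index-tracking accumulator loop by a structural right-recursion on the
-- name list whose two-element base case inserts the Oxford ", and " (objective: alternative).

-- ===== PORT A =====
def process_author_field (list_of_authors : Option String) : String :=
  match list_of_authors with
  | some s =>
    let list_of_authors_delimited := PySem.Chars.splitOn s.toList " and ".toList
    let list_of_authors_final : List Char :=
      (PySem.List.enumerate list_of_authors_delimited).foldl
        (fun acc p =>
          if (0 : Int) == p.1 then p.2
          else if ((list_of_authors_delimited.length : Int) - 1) == p.1 then
            acc ++ ", and ".toList ++ p.2
          else
            acc ++ ", ".toList ++ p.2) []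
    String.ofList list_of_authors_final
  | none => ""

-- ===== PORT B =====
-- helper oxford: structural recursion, base cases [] / [x] / [x, y]
def pvOxford : List (List Char) → List Char
  | [] => []
  | [x] => x
  | [x, y] => x ++ ", and ".toList ++ y
  | x :: rest => x ++ ", ".toList ++ pvOxford rest

def process_author_field_alt (list_of_authors : Option String) : String :=
  match list_of_authors with
  | none => ""
  | some s => String.ofList (pvOxford (PySem.Chars.splitOn s.toList " and ".toList))

-- ===== PRECONDITION & SPEC =====
def Spec_process_author_field (list_of_authors : Option String) (out : String) : Prop := out = process_author_field_alt list_of_authors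
instance (list_of_authors : Option String) (out : String) : Decidable (Spec_process_author_field list_of_authors out) := by unfold Spec_process_author_field; infer_instance

-- ===== CLAIM =====
def Claim_equal_process_author_field : Prop := ∀ (list_of_authors : Option String), Dom_process_author_field list_of_authors → Spec_process_author_field list_of_authors (process_author_field list_of_authors)

-- ===== LEMMAS AND PROOFS =====

theorem pv_go_length (sep : List Char) :
    ∀ fuel l cur acc, acc.length < (PySem.Chars.splitOn.go sep fuel l cur acc).length := by
  intro fuel
  induction fuel with
  | zero => intro l cur acc; simp [PySem.Chars.splitOn.go]
  | succ n ih =>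
    intro l cur acc
    cases l with
    | nil => simp [PySem.Chars.splitOn.go]
    | cons c rest =>
      rw [PySem.Chars.splitOn.go]
      split
      · exact lt_trans (by simp) (ih _ _ _)
      · exact ih _ _ _

theorem pv_splitOn_ne_nil (s sep : List Char) : PySem.Chars.splitOn s sep ≠ [] := by
  have h := pv_go_length sep (s.length + 1) s [] []
  intro hc
  rw [PySem.Chars.splitOn] at hc
  simp [hc] at h

theorem pv_loop (L : Int) :
    ∀ (ys : List (List Char)) (h : ys ≠ []) (s : Int) (acc : List Char),
      1 ≤ s → s + ys.length = L →
      (PySem.List.enumerate ys s).foldl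
        (fun acc p =>
          if (0 : Int) == p.1 then p.2
          else if (L - 1) == p.1 then acc ++ ", and ".toList ++ p.2
          else acc ++ ", ".toList ++ p.2) acc
      = acc ++ ys.dropLast.flatMap (fun z => ", ".toList ++ z)
          ++ ", and ".toList ++ ys.getLast h := by
  intro ys
  induction ys with
  | nil => intro h; exact absurd rfl h
  | cons y ys ih =>
    intro _ s acc hs hL
    cases ys with
    | nil =>
      simp only [PySem.List.enumerate_cons, PySem.List.enumerate_nil, List.foldl_cons,
        List.foldl_nil, List.length_cons, List.length_nil] at *
      have h0 : ((0 : Int) == s) = false := by simp; omega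
      have h1 : ((L - 1 : Int) == s) = true := by simp; omega
      simp [h0, h1]
    | cons z zs =>
      rw [PySem.List.enumerate_cons, List.foldl_cons]
      have h0 : ((0 : Int) == s) = false := by simp; omega
      have h1 : ((L - 1 : Int) == s) = false := by
        simp only [List.length_cons] at hL; simp; omega
      rw [show (if (0:Int) == s then y else if (L-1) == s then acc ++ ", and ".toList ++ y
          else acc ++ ", ".toList ++ y) = acc ++ ", ".toList ++ y by simp [h0, h1]]
      rw [ih (by simp) (s+1) _ (by omega) (by simp only [List.length_cons] at hL ⊢; omega)]
      simp [List.getLast]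

theorem pv_oxford_char (ns : List (List Char)) (h : ns ≠ []) :
    ∀ x, pvOxford (x :: ns)
      = x ++ ns.dropLast.flatMap (fun z => ", ".toList ++ z)
          ++ ", and ".toList ++ ns.getLast h := by
  induction ns with
  | nil => exact absurd rfl h
  | cons y ys ih =>
    intro x
    cases ys with
    | nil => simp [pvOxford, List.getLast]
    | cons z zs =>
      rw [show pvOxford (x :: y :: z :: zs) = x ++ ", ".toList ++ pvOxford (y :: z :: zs)
            from rfl,
          ih (by simp) y]
      simp [List.getLast_cons, List.dropLast_cons_of_ne_nil]

-- ===== VERDICT =====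
theorem process_author_field_spec : Claim_equal_process_author_field := by
  intro o _
  unfold Spec_process_author_field process_author_field process_author_field_alt
  cases o with
  | none => rfl
  | some s =>
    simp only []
    obtain ⟨x, xs, hp⟩ : ∃ x xs, PySem.Chars.splitOn s.toList " and ".toList = x :: xs := by
      cases h : PySem.Chars.splitOn s.toList " and ".toList with
      | nil => exact absurd h (pv_splitOn_ne_nil _ _)
      | cons a b => exact ⟨a, b, rfl⟩
    rw [hp]
    cases xs with
    | nil => simp [PySem.List.enumerate_cons, pvOxford]
    | cons y ys =>
      rw [PySem.List.enumerate_cons, List.foldl_cons]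
      rw [show (if (0:Int) == 0 then x else if (((x::y::ys).length : Int) - 1) == 0 then
          [] ++ ", and ".toList ++ x else [] ++ ", ".toList ++ x) = x by simp]
      rw [show ((0:Int)+1) = 1 from rfl]
      rw [pv_loop ((x::y::ys).length : Int) (y :: ys) (by simp) 1 x (le_refl 1)
        (by simp; omega)]
      rw [pv_oxford_char (y :: ys) (by simp) x]
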